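-- pv_equiv track=rewrite | github.com/dorakingx/openmetadata-mcp-server | ometa_client.py | _format_tags
-- ===== SOURCE A (Python) =====
-- from typing import Any, Dict, List, Optional
--
-- def _format_tags(columns: Optional[List[Dict[str, Any]]]) -> List[str]:
--     tags: List[str] = []
--     if not columns:
--         return tags
--     for column in columns:
--         for tag in column.get("tags", []) or []:
--             tag_name = tag.get("tagFQN") or tag.get("name")
--             if tag_name and tag_name not in tags:
--                 tags.append(tag_name)
--     return tags
-- ===== SOURCE B (Python) =====
-- from typing import Any, Dict, List, Optional
--
-- def _format_tags(columns: Optional[List[Dict[str, Any]]]) -> List[str]: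
--     if not columns:
--         return []
--     names = [
--         name
--         for column in columns
--         for tag in (column.get("tags", []) or [])
--         if (name := tag.get("tagFQN") or tag.get("name"))
--     ]
--     return [n for i, n in enumerate(names) if names.index(n) == i]
-- ===== Notes on version B (the rewrite author's own statement) =====
-- stated objective: alternative
-- what changed: B first flattens the truthy tag names into one list, then selects each position whose name's first occurrence index equals its own position (names.index(n) == i), maintaining no seen-accumulator at all, instead of A's interleaved append-if-not-in-accumulator inside nested loops.
import Mathlib
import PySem

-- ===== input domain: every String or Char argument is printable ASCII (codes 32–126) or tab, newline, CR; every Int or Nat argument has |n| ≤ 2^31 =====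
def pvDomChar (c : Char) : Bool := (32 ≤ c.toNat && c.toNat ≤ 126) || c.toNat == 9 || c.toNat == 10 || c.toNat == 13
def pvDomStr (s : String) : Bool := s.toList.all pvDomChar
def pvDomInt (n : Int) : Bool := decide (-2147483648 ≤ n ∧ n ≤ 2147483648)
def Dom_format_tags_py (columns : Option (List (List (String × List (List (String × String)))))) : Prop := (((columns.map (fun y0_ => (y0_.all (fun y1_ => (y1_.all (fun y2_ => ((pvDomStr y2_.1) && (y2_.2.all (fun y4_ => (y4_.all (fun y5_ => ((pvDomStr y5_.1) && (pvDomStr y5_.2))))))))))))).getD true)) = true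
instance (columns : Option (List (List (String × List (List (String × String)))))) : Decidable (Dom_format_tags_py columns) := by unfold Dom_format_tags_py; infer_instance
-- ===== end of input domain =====

-- B flattens the truthy tag names into one list and then keeps each position whose
-- name first occurs there (names.index(n) == i), with no seen-accumulator, instead of
-- A's interleaved append-if-not-in-accumulator inside nested loops; same return value.

-- shared helper: the Python expression `tag.get("tagFQN") or tag.get("name")` followed by
-- the truthiness test; None and "" are both falsy, so "" represents both exactly.
def pvTagName (tag : List (String × String)) : String :=
  let f := ((PySem.Dict.mk tag).get? "tagFQN").getD ""
  if f ≠ "" then f else ((PySem.Dict.mk tag).get? "name").getD ""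

-- ===== PORT A =====
def format_tags_py (columns : Option (List (List (String × List (List (String × String)))))) : List String :=
  match columns with
  | none => []                                 -- `if not columns` (None)
  | some cols =>
    if cols = [] then [] else                  -- `if not columns` (empty list)
    cols.foldl (fun tags column =>
      let tlist := (PySem.Dict.mk column).getD "tags" []
      let tlist := if tlist = [] then [] else tlist     -- `... or []` (a list is falsy iff empty)
      tlist.foldl (fun tags tag =>
        let tag_name := pvTagName tag
        if tag_name ≠ "" ∧ tag_name ∉ tags then tags ++ [tag_name] else tags) tags) []

-- ===== PORT B =====
def format_tags_py_alt (columns : Option (List (List (String × List (List (String × String)))))) : List String :=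
  match columns with
  | none => []
  | some cols =>
    if cols = [] then [] else
    -- the comprehension: flatten, keeping only truthy names
    let names := cols.flatMap (fun column =>
      let tl := (PySem.Dict.mk column).getD "tags" []
      ((if tl = [] then [] else tl).map pvTagName).filter (fun n => n ≠ ""))
    -- `[n for i, n in enumerate(names) if names.index(n) == i]`
    ((PySem.List.enumerate names).filter
      (fun p => (PySem.List.index? names p.2).map (fun k => (k : Int)) == some p.1)).map Prod.snd

-- ===== PRECONDITION & SPEC =====
def Spec_format_tags_py (columns : Option (List (List (String × List (List (String × String)))))) (out : List String) : Prop := out = format_tags_py_alt columns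
instance (columns : Option (List (List (String × List (List (String × String)))))) (out : List String) : Decidable (Spec_format_tags_py columns out) := by unfold Spec_format_tags_py; infer_instance

-- ===== CLAIM (what is proved, stated in full; the proofs are below) =====
def Claim_equal_format_tags_py : Prop := ∀ (columns : Option (List (List (String × List (List (String × String)))))), Dom_format_tags_py columns → Spec_format_tags_py columns (format_tags_py columns)

-- ===== LEMMAS AND PROOFS =====

-- A's add-if-truthy-and-new step over a name list is Set.add folded over the truthy names.
theorem foldl_addIfNew_eq_foldl_add (ns : List String) : ∀ (acc : List String),
    ns.foldl (fun tags n => if n ≠ "" ∧ n ∉ tags then tags ++ [n] else tags) acc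
      = (ns.filter (fun n => n ≠ "")).foldl PySem.Set.add acc := by
  induction ns with
  | nil => intro acc; rfl
  | cons n ns ih =>
    intro acc
    by_cases hne : n = ""
    · simp [hne, ih]
    · simp only [List.foldl_cons, List.filter_cons, hne, decide_not, ne_eq,
        not_false_eq_true, true_and, ih]
      by_cases hm : n ∈ acc <;> simp [PySem.Set.add, PySem.Set.contains, hm]

-- A's nested column/name loop is Set.add folded over the flattened, truthiness-filtered names.
theorem foldl_cols_eq_foldl_add {α β : Type} (g : α → List β) (f : β → String) (cols : List α) :
    ∀ (acc : List String),
    cols.foldl (fun tags column =>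
        (g column).foldl (fun tags t => if f t ≠ "" ∧ f t ∉ tags then tags ++ [f t] else tags) tags) acc
      = (cols.flatMap (fun c => ((g c).map f).filter (fun n => n ≠ ""))).foldl PySem.Set.add acc := by
  induction cols with
  | nil => intro acc; rfl
  | cons c cs ih =>
    intro acc
    rw [List.foldl_cons, ih, List.flatMap_cons, List.foldl_append]
    congr 1
    rw [← foldl_addIfNew_eq_foldl_add, List.foldl_map]

-- first-occurrence dedup IS the keep-positions-whose-first-index-is-their-own filter
theorem ofList_eq_indexFilter (ys : List String) :
    PySem.Set.ofList ys
      = ((PySem.List.enumerate ys).filter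
          (fun p => (PySem.List.index? ys p.2).map (fun k => (k : Int)) == some p.1)).map Prod.snd := by
  induction ys using List.reverseRecOn with
  | nil => rfl
  | append_singleton ys x ih =>
    rw [PySem.Set.ofList_append_singleton, PySem.List.enumerate_append, List.filter_append,
      List.map_append]
    have hfilter : List.filter
          (fun p => (PySem.List.index? (ys ++ [x]) p.2).map (fun k => (k : Int)) == some p.1)
          (PySem.List.enumerate ys)
        = List.filter
          (fun p => (PySem.List.index? ys p.2).map (fun k => (k : Int)) == some p.1)
          (PySem.List.enumerate ys) := by
      apply List.filter_congr
      intro p hp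
      obtain ⟨k, hk, rfl⟩ := (PySem.List.mem_enumerate_iff ys 0 p).mp hp
      rw [PySem.List.index?_append_of_mem _ (List.getElem_mem hk)]
    rw [hfilter, ← ih]
    by_cases hx : x ∈ ys
    · obtain ⟨k, hks⟩ := Option.isSome_iff_exists.mp ((PySem.List.index?_isSome_iff ys x).mpr hx)
      obtain ⟨hklt, -, -⟩ := PySem.List.getElem_of_index?_eq_some hks
      have hidx := PySem.List.index?_append_of_mem (l := ys) [x] hx
      simp only [PySem.List.enumerate_cons, PySem.List.enumerate_nil, List.filter_cons,
        List.filter_nil, hidx, hks]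
      simp [PySem.Set.add, PySem.Set.contains, PySem.Set.mem_ofList, hx]
      omega
    · have hidx := PySem.List.index?_append_singleton_self ys x hx
      simp only [PySem.List.enumerate_cons, PySem.List.enumerate_nil, List.filter_cons,
        List.filter_nil, hidx]
      simp [PySem.Set.add, PySem.Set.contains, PySem.Set.mem_ofList, hx]

theorem format_tags_py_eq (columns : Option (List (List (String × List (List (String × String)))))) :
    format_tags_py columns = format_tags_py_alt columns := by
  unfold format_tags_py format_tags_py_alt
  match columns with
  | none => rfl
  | some cols =>
    by_cases h : cols = []
    · simp [h]
    · simp only [h, reduceIte]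
      rw [foldl_cols_eq_foldl_add
        (g := fun column =>
          let tl := (PySem.Dict.mk column).getD "tags" []
          if tl = [] then [] else tl) (f := pvTagName),
        ← PySem.Set.ofList_eq_foldl, ofList_eq_indexFilter]

-- ===== VERDICT (by name: the statement is the Claim_ definition above) =====
theorem format_tags_py_spec : Claim_equal_format_tags_py := by
  intro columns _
  exact (format_tags_py_eq columns).symm ▸ rfl
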